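-- pv_equiv track=rewrite | github.com/beingdpkpr/streamlit-profile | src/views/hierarchy-detector.py | extract_chains
-- ===== SOURCE A (Python) =====
-- def extract_chains(adjacency):
--     reverse_edges = {n: set() for n in adjacency}
--     for src, tgts in adjacency.items():
--         for tgt in tgts:
--             reverse_edges[tgt].add(src)
--
--     roots = [n for n in adjacency if not reverse_edges[n]]
--     chains = []
--
--     def dfs(node, path):
--         if not adjacency[node]:
--             chains.append(path)
--             return
--         for nxt in adjacency[node]:
--             if nxt not in path:
--                 dfs(nxt, path + [nxt])
--
--     for root in roots:
--         dfs(root, [root])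
--     return [c for c in chains if len(c) > 1]
-- ===== SOURCE B (Python) =====
-- def extract_chains(adjacency):
--     # Iterative DFS with an explicit stack instead of recursion; roots found via a
--     # single set of all targets instead of a dict of reverse-edge sets; chains of
--     # length > 1 collected directly instead of filtered afterwards.
--     incoming = set()
--     for tgts in adjacency.values():
--         incoming.update(tgts)
--
--     chains = []
--     stack = [(r, [r]) for r in reversed(list(adjacency)) if r not in incoming]
--     while stack:
--         node, path = stack.pop()
--         succ = adjacency[node]
--         if not succ:
--             if len(path) > 1:
--                 chains.append(path)
--         else:
--             for nxt in reversed(succ):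
--                 if nxt not in path:
--                     stack.append((nxt, path + [nxt]))
--     return chains
-- ===== Notes on version B (the rewrite author's own statement) =====
-- stated objective: alternative
-- what changed: Recursive dfs replaced by an explicit-stack iterative DFS (successors pushed in reversed order to keep A's preorder), the dict of reverse-edge sets replaced by one set of all targets for root detection, and length>1 chains collected at leaf time instead of filtered afterwards.
import Mathlib
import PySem

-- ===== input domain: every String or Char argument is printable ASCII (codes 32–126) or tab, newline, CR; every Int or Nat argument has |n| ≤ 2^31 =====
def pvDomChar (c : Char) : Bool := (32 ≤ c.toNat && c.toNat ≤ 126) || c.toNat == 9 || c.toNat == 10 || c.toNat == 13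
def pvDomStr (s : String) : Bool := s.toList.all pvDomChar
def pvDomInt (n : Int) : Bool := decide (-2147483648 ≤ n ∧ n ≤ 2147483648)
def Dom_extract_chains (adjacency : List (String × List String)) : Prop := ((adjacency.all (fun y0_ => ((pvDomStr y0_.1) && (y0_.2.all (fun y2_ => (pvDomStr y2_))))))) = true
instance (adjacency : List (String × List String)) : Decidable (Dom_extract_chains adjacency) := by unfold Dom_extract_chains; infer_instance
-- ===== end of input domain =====

-- B: explicit-stack iterative DFS instead of recursion, one set of all targets instead of a
-- dict of reverse-edge sets for root detection, length>1 chains collected at leaf time.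
-- Both ports guard the DFS with fuel = adjacency.length + 1, a totality guard only.

-- ===== PORT A =====
-- reverse_edges = {n: set() for n in adjacency}; for src, tgts …: reverse_edges[tgt].add(src)
def ecRev (adjacency : List (String × List String)) : PySem.Dict String (PySem.Set String) :=
  let d0 := adjacency.foldl (fun d p => d.insert p.1 PySem.Set.empty) PySem.Dict.empty
  adjacency.foldl (fun d p => p.2.foldl (fun d t => d.modify t PySem.Set.empty (fun s => PySem.Set.add s p.1)) d) d0

-- def dfs(node, path): …  (fuel is a totality guard only; Python's recursion is bounded by the path guard)
def ecDfs (adjacency : List (String × List String)) : Nat → String → List String → List (List String)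
  | 0, _, _ => []
  | fuel+1, node, path =>
    match (PySem.Dict.mk adjacency).get? node with
    | none => []          -- KeyError in Python: outside Pre_
    | some tgts =>
      if tgts.isEmpty then [path]
      else tgts.flatMap (fun nxt => if path.contains nxt then [] else ecDfs adjacency fuel nxt (path ++ [nxt]))

def extract_chains (adjacency : List (String × List String)) : List (List String) :=
  let roots := (adjacency.map Prod.fst).filter (fun n => ((ecRev adjacency).getD n PySem.Set.empty).isEmpty)
  let chains := roots.foldl (fun ch r => ch ++ ecDfs adjacency (adjacency.length + 1) r [r]) []
  chains.filter (fun c => decide (1 < c.length))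

-- ===== PORT B =====
-- base of the termination measure for the stack loop (1 + the largest successor-list length)
def ecBase (adjacency : List (String × List String)) : Nat :=
  adjacency.foldl (fun m p => max m p.2.length) 0 + 1

theorem ecGet?_mem_snd (adjacency : List (String × List String)) (k : String) (v : List String)
    (h : (PySem.Dict.mk adjacency).get? k = some v) : v ∈ adjacency.map Prod.snd := by
  induction adjacency with
  | nil => simp [PySem.Dict.get?] at h
  | cons p rest ih =>
    rw [show p = (p.1, p.2) from rfl, PySem.Dict.get?_mk_cons] at h
    by_cases hk : p.1 == k
    · simp [hk] at h; simp [← h]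
    · simp [hk] at h; simp [ih h]

theorem ecGet?_lt_base (adjacency : List (String × List String)) (k : String) (v : List String)
    (h : (PySem.Dict.mk adjacency).get? k = some v) : v.length < ecBase adjacency := by
  have hm := ecGet?_mem_snd adjacency k v h
  have := (PySem.List.le_foldl_max_nat (adjacency.map Prod.snd) (fun l => l.length) 0).2
  have h2 : adjacency.foldl (fun m p => max m p.2.length) 0
      = (adjacency.map Prod.snd).foldl (fun m l => max m l.length) 0 := by
    rw [List.foldl_map]
  unfold ecBase
  have := this v hm
  omega

-- 'for nxt in reversed(succ): if nxt not in path: stack.append(…)' pushed onto the front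
theorem ecPush_shape (succ path : List String) (fuel : Nat) (rest : List (Nat × String × List String)) :
    succ.reverse.foldl (fun st nxt => if path.contains nxt then st else (fuel, nxt, path ++ [nxt]) :: st) rest
      = (succ.filter (fun nxt => !path.contains nxt)).map (fun nxt => (fuel, nxt, path ++ [nxt])) ++ rest := by
  rw [List.foldl_reverse]
  induction succ with
  | nil => rfl
  | cons x xs ih =>
    simp only [List.foldr_cons, List.filter_cons, ih]
    by_cases hx : x ∈ path <;> simp [hx]

theorem ecMeasure_push_lt (adjacency : List (String × List String)) (succ path : List String)
    (fuel : Nat) (rest : List (Nat × String × List String))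
    (hs : succ.length < ecBase adjacency) :
    (((succ.filter (fun nxt => !path.contains nxt)).map (fun nxt => (fuel, nxt, path ++ [nxt])) ++ rest).map
        (fun t => ecBase adjacency ^ t.1)).sum
      < ((((fuel+1, node, path) : Nat × String × List String) :: rest).map (fun t => ecBase adjacency ^ t.1)).sum := by
  have hb : 0 < ecBase adjacency := by unfold ecBase; omega
  have hpow : 0 < ecBase adjacency ^ fuel := Nat.pow_pos hb
  simp only [List.map_append, List.map_cons, List.sum_append, List.sum_cons, List.map_map]
  have hconst : ((succ.filter (fun nxt => !path.contains nxt)).map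
      ((fun t => ecBase adjacency ^ t.1) ∘ (fun nxt => (fuel, nxt, path ++ [nxt])))).sum
      = (succ.filter (fun nxt => !path.contains nxt)).length * ecBase adjacency ^ fuel := by
    simp only [Function.comp_def]
    rw [List.map_const']
    simp [List.sum_replicate, smul_eq_mul, Nat.mul_comm]
  rw [hconst]
  have hk : (succ.filter (fun nxt => !path.contains nxt)).length < ecBase adjacency :=
    lt_of_le_of_lt (List.length_filter_le _ _) hs
  have : (succ.filter (fun nxt => !path.contains nxt)).length * ecBase adjacency ^ fuel
      < ecBase adjacency ^ (fuel + 1) := by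
    rw [pow_succ, mul_comm (ecBase adjacency ^ fuel)]
    exact Nat.mul_lt_mul_of_lt_of_le hk (le_refl _) hpow
  omega

-- while stack: node, path = stack.pop(); …   (head of the list = top of the stack)
def ecLoop (adjacency : List (String × List String)) :
    List (Nat × String × List String) → List (List String) → List (List String)
  | [], chains => chains
  | (0, _, _) :: rest, chains => ecLoop adjacency rest chains      -- fuel guard, never hit by Python
  | (fuel+1, node, path) :: rest, chains =>
    match h : (PySem.Dict.mk adjacency).get? node with
    | none => ecLoop adjacency rest chains                        -- KeyError in Python: outside Pre_
    | some succ =>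
      if succ.isEmpty then
        ecLoop adjacency rest (if 1 < path.length then chains ++ [path] else chains)
      else
        ecLoop adjacency
          (succ.reverse.foldl (fun st nxt => if path.contains nxt then st else (fuel, nxt, path ++ [nxt]) :: st) rest)
          chains
termination_by frames _ => (frames.map (fun t => ecBase adjacency ^ t.1)).sum
decreasing_by
  · simp only [List.map_cons, List.sum_cons, pow_zero]; omega
  · simp only [List.map_cons, List.sum_cons]
    have hb : 0 < ecBase adjacency := by unfold ecBase; omega
    have : 0 < ecBase adjacency ^ (fuel+1) := Nat.pow_pos hb
    simp only [Nat.succ_eq_add_one]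
    omega
  · simp only [List.map_cons, List.sum_cons]
    have hb : 0 < ecBase adjacency := by unfold ecBase; omega
    have : 0 < ecBase adjacency ^ (fuel+1) := Nat.pow_pos hb
    simp only [Nat.succ_eq_add_one]
    omega
  · simp only [dite_eq_ite]
    rw [ecPush_shape]
    exact ecMeasure_push_lt adjacency succ path fuel rest (ecGet?_lt_base adjacency node succ h)

def extract_chains_alt (adjacency : List (String × List String)) : List (List String) :=
  let incoming := adjacency.foldl (fun s p => PySem.Set.update s p.2) PySem.Set.empty
  -- '[(r, [r]) for r in reversed(list(adjacency)) if r not in incoming]' popped from the END: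
  -- as a head-is-top stack the two reversals cancel, leaving the keys in order.
  let stack := ((adjacency.map Prod.fst).filter (fun r => !(PySem.Set.contains incoming r))).map
      (fun r => (adjacency.length + 1, r, ([r] : List String)))
  ecLoop adjacency stack []
-- ===== PRECONDITION & SPEC =====
-- Pre_ excludes exactly the inputs on which the Python A raises KeyError: some listed
-- target is not a key of the adjacency dict (reverse_edges[tgt].add(src) fails there).
def Pre_extract_chains (adjacency : List (String × List String)) : Prop :=
  ∀ p ∈ adjacency, ∀ t ∈ p.2, t ∈ adjacency.map Prod.fst
instance (adjacency : List (String × List String)) : Decidable (Pre_extract_chains adjacency) := by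
  unfold Pre_extract_chains; infer_instance

def pvWitness_extract_chains : (List (String × List String)) :=
  [("a", ["b", "c"]), ("b", ["c"]), ("c", [])]

def Spec_extract_chains (adjacency : List (String × List String)) (out : List (List String)) : Prop := out = extract_chains_alt adjacency
instance (adjacency : List (String × List String)) (out : List (List String)) : Decidable (Spec_extract_chains adjacency out) := by unfold Spec_extract_chains; infer_instance

-- ===== CLAIM (what is proved, stated in full; the proofs are below) =====
def Claim_equal_extract_chains : Prop := ∀ (adjacency : List (String × List String)), Dom_extract_chains adjacency → Pre_extract_chains adjacency → Spec_extract_chains adjacency (extract_chains adjacency)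

-- ===== LEMMAS AND PROOFS =====
-- (The two ports in fact agree on every input; the proofs below do not need Pre_, which
-- only delimits where the Python A returns instead of raising.)

theorem ecGuard (adjacency : List (String × List String)) (succ path : List String) (fuel : Nat) :
    ((succ.filter (fun nxt => !path.contains nxt)).map (fun nxt => (fuel, nxt, path ++ [nxt]))).flatMap
        (fun t => ecDfs adjacency t.1 t.2.1 t.2.2)
      = succ.flatMap (fun nxt => if path.contains nxt then [] else ecDfs adjacency fuel nxt (path ++ [nxt])) := by
  induction succ with
  | nil => rfl
  | cons x xs ih =>
    simp only [List.contains_eq_mem] at ih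
    by_cases hx : x ∈ path <;> simp [hx, ih]

theorem ecLoop_eq (adjacency : List (String × List String))
    (frames : List (Nat × String × List String)) (chains : List (List String)) :
    ecLoop adjacency frames chains
      = chains ++ (frames.flatMap (fun t => ecDfs adjacency t.1 t.2.1 t.2.2)).filter
          (fun c => decide (1 < c.length)) := by
  induction frames, chains using ecLoop.induct adjacency
  case case1 chains => simp [ecLoop]
  case case2 rest chains ih =>
    rw [ecLoop]
    simp only [List.flatMap_cons, ecDfs]
    simpa using ih
  case case3 fuel node path rest chains h ih =>
    rw [ecLoop]
    split
    next h2 => rw [ih]; simp [List.flatMap_cons, ecDfs, h]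
    next succ h2 => rw [h] at h2; cases h2
  case case4 fuel node path rest chains succ h he ih =>
    rw [ecLoop]
    split
    next h2 => rw [h] at h2; cases h2
    next succ2 h2 =>
      rw [h] at h2; injection h2 with h2; subst h2
      rw [if_pos he]
      simp only [dite_eq_ite] at ih
      rw [ih]
      by_cases hp : 1 < path.length <;>
        simp [ecDfs, h, he, hp]
  case case5 fuel node path rest chains succ h he ih =>
    rw [ecLoop]
    split
    next h2 => rw [h] at h2; cases h2
    next succ2 h2 =>
      rw [h] at h2; injection h2 with h2; subst h2
      rw [if_neg he]
      simp only [dite_eq_ite] at ih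
      rw [ecPush_shape] at ih ⊢
      rw [ih, List.flatMap_append, ecGuard]
      simp [ecDfs, h, he, List.filter_append]

theorem ecAdd_ne_nil (s : PySem.Set String) (x : String) : PySem.Set.add s x ≠ [] := by
  unfold PySem.Set.add
  cases s with
  | nil => simp [PySem.Set.contains]
  | cons a t => split <;> simp

theorem ecD0_get? (l : List (String × List String)) (d : PySem.Dict String (PySem.Set String)) (n : String) :
    (l.foldl (fun d p => d.insert p.1 PySem.Set.empty) d).get? n
      = if n ∈ l.map Prod.fst then some PySem.Set.empty else d.get? n := by
  induction l generalizing d with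
  | nil => simp
  | cons p t ih =>
    simp only [List.foldl_cons, ih, List.map_cons, List.mem_cons]
    by_cases hn : n ∈ t.map Prod.fst
    · simp [hn]
    · by_cases he : n = p.1 <;> simp [hn, he, PySem.Dict.get?_insert]

theorem ecInner_empty (src n : String) (tgts : List String) (d : PySem.Dict String (PySem.Set String)) :
    ((tgts.foldl (fun d t => d.modify t PySem.Set.empty (fun s => PySem.Set.add s src)) d).getD n PySem.Set.empty).isEmpty
      = (((d.getD n PySem.Set.empty).isEmpty) && !tgts.contains n) := by
  induction tgts generalizing d with
  | nil => simp
  | cons t ts ih =>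
    simp only [List.foldl_cons, ih, PySem.Dict.getD_modify]
    by_cases he : n = t
    · simp [he, List.isEmpty_iff, ecAdd_ne_nil]
    · simp [he]

theorem ecOuter_empty (n : String) (l : List (String × List String)) (d : PySem.Dict String (PySem.Set String)) :
    ((l.foldl (fun d p => p.2.foldl (fun d t => d.modify t PySem.Set.empty (fun s => PySem.Set.add s p.1)) d) d).getD n PySem.Set.empty).isEmpty
      = (((d.getD n PySem.Set.empty).isEmpty) && l.all (fun p => !p.2.contains n)) := by
  induction l generalizing d with
  | nil => simp
  | cons p t ih =>
    simp only [List.foldl_cons, ih, ecInner_empty, List.all_cons]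
    by_cases hc : n ∈ p.2 <;> simp [hc]

theorem ecMem_update (xs : List String) (s : PySem.Set String) (n : String) :
    n ∈ PySem.Set.update s xs ↔ n ∈ s ∨ n ∈ xs := by
  unfold PySem.Set.update
  induction xs generalizing s with
  | nil => simp
  | cons x t ih =>
    simp only [List.foldl_cons, ih, PySem.Set.mem_add, List.mem_cons]
    tauto

theorem ecMem_incoming (l : List (String × List String)) (s : PySem.Set String) (n : String) :
    n ∈ l.foldl (fun s p => PySem.Set.update s p.2) s ↔ n ∈ s ∨ ∃ p ∈ l, n ∈ p.2 := by
  induction l generalizing s with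
  | nil => simp
  | cons p t ih =>
    simp only [List.foldl_cons, ih, ecMem_update, List.mem_cons]
    constructor
    · rintro ((h | h) | ⟨q, hq, hnq⟩)
      · exact Or.inl h
      · exact Or.inr ⟨p, Or.inl rfl, h⟩
      · exact Or.inr ⟨q, Or.inr hq, hnq⟩
    · rintro (h | ⟨q, (rfl | hq), hnq⟩)
      · exact Or.inl (Or.inl h)
      · exact Or.inl (Or.inr hnq)
      · exact Or.inr ⟨q, hq, hnq⟩

theorem ecRoots_eq (adjacency : List (String × List String)) (n : String)
    (hn : n ∈ adjacency.map Prod.fst) :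
    ((ecRev adjacency).getD n PySem.Set.empty).isEmpty
      = !(PySem.Set.contains (adjacency.foldl (fun s p => PySem.Set.update s p.2) PySem.Set.empty) n) := by
  unfold ecRev
  rw [ecOuter_empty]
  have hd0 : ((adjacency.foldl (fun (d : PySem.Dict String (PySem.Set String)) p => d.insert p.1 PySem.Set.empty) PySem.Dict.empty).getD n PySem.Set.empty).isEmpty = true := by
    rw [PySem.Dict.getD_eq_get?_getD, ecD0_get?]
    simp [hn, PySem.Set.empty]
  rw [hd0]
  simp only [Bool.true_and]
  have hmem : (n ∈ adjacency.foldl (fun s p => PySem.Set.update s p.2) PySem.Set.empty) ↔ ∃ p ∈ adjacency, n ∈ p.2 := by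
    rw [ecMem_incoming]
    simp [PySem.Set.empty]
  simp only [PySem.Set.contains_eq_listContains, List.contains_eq_mem]
  by_cases hin : ∃ p ∈ adjacency, n ∈ p.2
  · obtain ⟨p, hp, hnp⟩ := hin
    have h2 : n ∈ adjacency.foldl (fun s p => PySem.Set.update s p.2) PySem.Set.empty := hmem.mpr ⟨p, hp, hnp⟩
    simp only [h2, decide_true, Bool.not_true, List.all_eq_false]
    exact ⟨p, hp, by simp [hnp]⟩
  · have h2 : ¬ n ∈ adjacency.foldl (fun s p => PySem.Set.update s p.2) PySem.Set.empty := fun h => hin (hmem.mp h)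
    simp only [h2, decide_false, Bool.not_false, List.all_eq_true]
    intro p hp
    simp only [Bool.not_eq_eq_eq_not, Bool.not_true, decide_eq_false_iff_not]
    exact fun hnp => hin ⟨p, hp, hnp⟩

theorem extract_chains_ok (adjacency : List (String × List String)) :
    extract_chains adjacency = extract_chains_alt adjacency := by
  simp only [extract_chains, extract_chains_alt]
  rw [ecLoop_eq, PySem.List.foldl_append_eq_flatMap]
  simp only [List.nil_append, List.flatMap_map]
  congr 1
  rw [List.filter_congr (fun x hx => ecRoots_eq adjacency x hx)]

-- ===== VERDICT (by name: the statement is the Claim_ definition above) =====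
theorem extract_chains_spec : Claim_equal_extract_chains := by
  intro adjacency _ _
  unfold Spec_extract_chains
  exact extract_chains_ok adjacency
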